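-- pv_equiv track=rewrite | github.com/ejplatform/django-boogie | src/boogie/configurations/django_conf.py | with_app
-- ===== SOURCE A (Python) =====
-- def with_app(app, app_list, deps=None, optdeps=None):
--     """
--     Insert app on list, respecting its dependencies.
--
--     Usage:
--         Useful for third parties declare dependency classes:
--
--         class MyAppConf(InstalledAppsConf):
--             def get_third_party_apps(self):
--                 apps = super().get_third_party_apps()
--                 return self.with_app('my_app', apps, deps=['dep1', 'dep2'])
--
--     Args:
--         app:
--             App name.
--         app_list:
--             List of apps.
--         deps:
--             List of hard dependencies. All apps in that list are also
--             inserted in the result just after the inserted app.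
--         optdeps:
--             List of optional dependencies. App will be inserted just
--             before all apps in list if they appear in the app list.
--
--     Returns:
--         A list of apps.
--     """
--     apps = [app]
--     apps.extend(x for x in (deps or ()) if x not in app_list)
--     all_deps = set(deps or ())
--     all_deps.update(optdeps or ())
--
--     result = []
--     for app in app_list:
--         if apps and app in all_deps:
--             result.extend(apps)
--             apps = None
--         result.append(app)
--     return result
-- ===== SOURCE B (Python) =====
-- def with_app(app, app_list, deps=None, optdeps=None):
--     apps = [app] + [x for x in (deps or ()) if x not in app_list]
--     all_deps = set(deps or ()) | set(optdeps or ())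
--     idx = next((i for i, a in enumerate(app_list) if a in all_deps), None)
--     if idx is None:
--         return list(app_list)
--     return list(app_list[:idx]) + apps + list(app_list[idx:])
-- ===== Notes on version B (the rewrite author's own statement) =====
-- stated objective: simpler
-- what changed: Replaced A's accumulator loop with its apps-then-None sentinel state by computing the first index whose element is a dependency and splicing the apps list in with slice concatenation.
import Mathlib
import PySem

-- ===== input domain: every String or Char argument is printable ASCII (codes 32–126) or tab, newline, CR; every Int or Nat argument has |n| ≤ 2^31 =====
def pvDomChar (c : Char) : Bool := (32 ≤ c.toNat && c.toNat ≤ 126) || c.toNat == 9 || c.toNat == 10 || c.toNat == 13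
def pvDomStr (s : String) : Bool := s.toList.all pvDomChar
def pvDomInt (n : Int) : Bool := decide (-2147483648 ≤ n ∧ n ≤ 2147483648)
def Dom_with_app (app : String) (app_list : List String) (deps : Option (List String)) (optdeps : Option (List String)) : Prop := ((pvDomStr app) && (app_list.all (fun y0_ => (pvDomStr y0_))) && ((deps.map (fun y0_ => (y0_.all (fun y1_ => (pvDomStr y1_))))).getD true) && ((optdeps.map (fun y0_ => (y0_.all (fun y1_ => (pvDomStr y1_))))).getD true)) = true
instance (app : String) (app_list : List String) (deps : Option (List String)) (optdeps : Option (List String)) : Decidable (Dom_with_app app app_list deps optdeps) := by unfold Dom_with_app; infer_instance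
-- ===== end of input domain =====

-- B replaces A's accumulator loop with its apps-or-None sentinel by a direct
-- find-first-index + slice-and-concatenate (objective: simpler decomposition).

-- ===== PORT A =====
-- literal port: the loop carries (apps : Option, result); `apps and app in all_deps`
-- is `apps is a nonempty list and membership`, i.e. !(st.1.getD []).isEmpty && contains
def with_app (app : String) (app_list : List String) (deps : Option (List String)) (optdeps : Option (List String)) : List String :=
  let apps : List String := app :: ((deps.getD []).filter (fun x => !app_list.contains x))
  let all_deps : PySem.Set String := PySem.Set.update (PySem.Set.ofList (deps.getD [])) (optdeps.getD [])
  let st := app_list.foldl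
    (fun (st : Option (List String) × List String) (a : String) =>
      if !((st.1.getD []).isEmpty) && PySem.Set.contains all_deps a then
        (none, st.2 ++ st.1.getD [] ++ [a])
      else
        (st.1, st.2 ++ [a]))
    (some apps, [])
  st.2

-- ===== PORT B =====
def with_app_alt (app : String) (app_list : List String) (deps : Option (List String)) (optdeps : Option (List String)) : List String :=
  let apps : List String := app :: ((deps.getD []).filter (fun x => !app_list.contains x))
  let all_deps : PySem.Set String := PySem.Set.union (PySem.Set.ofList (deps.getD [])) (optdeps.getD [])
  match app_list.findIdx? (fun a => PySem.Set.contains all_deps a) with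
  | none => app_list
  | some i => app_list.take i ++ apps ++ app_list.drop i

-- ===== PRECONDITION & SPEC =====
def Spec_with_app (app : String) (app_list : List String) (deps : Option (List String)) (optdeps : Option (List String)) (out : List String) : Prop := out = with_app_alt app app_list deps optdeps
instance (app : String) (app_list : List String) (deps : Option (List String)) (optdeps : Option (List String)) (out : List String) : Decidable (Spec_with_app app app_list deps optdeps out) := by unfold Spec_with_app; infer_instance

-- ===== CLAIM (what is proved, stated in full; the proofs are below) =====
def Claim_equal_with_app : Prop := ∀ (app : String) (app_list : List String) (deps : Option (List String)) (optdeps : Option (List String)), Dom_with_app app app_list deps optdeps → Spec_with_app app app_list deps optdeps (with_app app app_list deps optdeps)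

-- ===== LEMMAS AND PROOFS =====

-- A's loop body, abstracted over the membership predicate
def pvStep (p : String → Bool) (st : Option (List String) × List String) (a : String) :
    Option (List String) × List String :=
  if !((st.1.getD []).isEmpty) && p a then (none, st.2 ++ st.1.getD [] ++ [a])
  else (st.1, st.2 ++ [a])

theorem pvLoop_none (p : String → Bool) (xs : List String) (acc : List String) :
    xs.foldl (pvStep p) (none, acc) = (none, acc ++ xs) := by
  induction xs generalizing acc with
  | nil => simp
  | cons a xs ih => simp [pvStep, ih]

theorem pvLoop_some (p : String → Bool) (xs : List String) (l : List String) (hl : l ≠ [])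
    (acc : List String) :
    (xs.foldl (pvStep p) (some l, acc)).2 =
      match xs.findIdx? p with
      | none => acc ++ xs
      | some i => acc ++ xs.take i ++ l ++ xs.drop i := by
  induction xs generalizing acc with
  | nil => simp
  | cons a xs ih =>
    by_cases hp : p a = true
    · have hne : l.isEmpty = false := by simpa [List.isEmpty_iff] using hl
      simp [pvStep, hne, hp, List.findIdx?_cons, pvLoop_none]
    · have hp' : p a = false := by simpa using hp
      simp only [List.foldl_cons, pvStep, hp', Bool.and_false, Bool.false_eq_true, if_false]
      rw [ih (acc ++ [a])]
      cases h : xs.findIdx? p with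
      | none => simp [List.findIdx?_cons, hp', h]
      | some i => simp [List.findIdx?_cons, hp', h]

-- membership in A's set (built with update) and B's set (built with union) agree
theorem pvMem_eq (d o : List String) (a : String) :
    PySem.Set.contains (PySem.Set.update (PySem.Set.ofList d) o) a
      = PySem.Set.contains (PySem.Set.union (PySem.Set.ofList d) o) a := by
  rw [Bool.eq_iff_iff, PySem.Set.contains_iff, PySem.Set.contains_iff,
    PySem.Set.mem_update, PySem.Set.mem_union]

-- ===== VERDICT (by name: the statement is the Claim_ definition above) =====
theorem with_app_spec : Claim_equal_with_app := by
  intro app app_list deps optdeps _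
  unfold Spec_with_app with_app with_app_alt
  dsimp only
  rw [show (fun (st : Option (List String) × List String) (a : String) =>
        if !((st.1.getD []).isEmpty) && PySem.Set.contains (PySem.Set.update (PySem.Set.ofList (deps.getD [])) (optdeps.getD [])) a then
          (none, st.2 ++ st.1.getD [] ++ [a])
        else (st.1, st.2 ++ [a]))
      = pvStep (fun a => PySem.Set.contains (PySem.Set.union (PySem.Set.ofList (deps.getD [])) (optdeps.getD [])) a) from by
        funext st a; simp only [pvStep, pvMem_eq]]
  rw [pvLoop_some _ _ _ (by simp) []]
  cases h : app_list.findIdx? (fun a => PySem.Set.contains (PySem.Set.union (PySem.Set.ofList (deps.getD [])) (optdeps.getD [])) a) with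
  | none => simp
  | some i => simp
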